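-- pv_equiv track=rewrite | github.com/bgutier5/Python_repository | python_practice/basic_scripts/test_matvec2.py | change_of_base
-- ===== SOURCE A (Python) =====
-- states = 3
--
-- mass = [1,1,1]
--
-- def change_of_base(x):
--  s = 0
--  if x == 0:
--   ivals = [0]*len(mass)
--   return(ivals)
--  s += 1
--
--  for i in range(len(mass)):
--   for l in range(1, states):
--    if s == x:
--     ivals = [0]*len(mass)
--     ivals[i] = l
--     ivals.reverse()
--     return(ivals)
--    s += 1
--
--  for j in range(len(mass)):
--   for i in range(j+1,len(mass)):
--    for l in range(1, states):
--     for m in range(1, states):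
--      if s == x:
--       ivals = [0]*len(mass)
--       ivals[i] = l
--       ivals[j] = m
--       ivals.reverse()
--       return(ivals)
--      s += 1
--
--  if s <= x:
--   ivals = [0]*len(mass)
--   return(ivals)
-- ===== SOURCE B (Python) =====
-- states = 3
--
-- mass = [1, 1, 1]
--
-- def change_of_base(x):
--     # Build the full enumeration table once, then answer by direct indexing.
--     table = [[0] * len(mass)]
--     for i in range(len(mass)):
--         for l in range(1, states):
--             ivals = [0] * len(mass)
--             ivals[i] = l
--             ivals.reverse()
--             table.append(ivals)
--     for j in range(len(mass)):
--         for i in range(j + 1, len(mass)):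
--             for l in range(1, states):
--                 for m in range(1, states):
--                     ivals = [0] * len(mass)
--                     ivals[i] = l
--                     ivals[j] = m
--                     ivals.reverse()
--                     table.append(ivals)
--     if 0 <= x < len(table):
--         return table[x]
--     if x >= len(table):
--         return [0] * len(mass)
--     return None
-- ===== Notes on version B (the rewrite author's own statement) =====
-- stated objective: simpler
-- what changed: B builds the full excitation table once with the same nested loops and then answers by direct indexing (table[x], a fresh zero vector past the end of the table, None for negative x), replacing A's counter-driven scan with early returns.
import Mathlib
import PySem

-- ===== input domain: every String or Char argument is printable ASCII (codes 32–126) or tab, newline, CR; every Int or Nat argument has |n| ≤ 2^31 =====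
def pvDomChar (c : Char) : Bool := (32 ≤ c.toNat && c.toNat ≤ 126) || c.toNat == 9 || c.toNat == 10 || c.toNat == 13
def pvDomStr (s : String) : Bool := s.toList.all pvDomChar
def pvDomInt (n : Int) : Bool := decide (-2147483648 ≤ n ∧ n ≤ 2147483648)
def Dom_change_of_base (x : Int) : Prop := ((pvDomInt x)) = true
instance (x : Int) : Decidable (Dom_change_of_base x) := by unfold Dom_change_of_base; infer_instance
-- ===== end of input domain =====

-- B builds the full 19-entry enumeration table once and answers by direct indexing,
-- replacing A's counter-driven scan with early returns (objective: simpler decomposition).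

-- ===== PORT A =====
def massA : List Int := [1, 1, 1]
def statesA : Int := 3

-- inner 'for l in range(1, states)' of the single-excitation block; state = (early return?, s)
-- loop indices come from range(...) so they are nonnegative: .toNat is exact here
def loopAl (i : Int) (ls : List Int) (s x : Int) : Option (List Int) × Int :=
  match ls with
  | [] => (none, s)
  | l :: rest =>
    if s = x then
      (some (((List.replicate massA.length (0 : Int)).set i.toNat l).reverse), s)
    else loopAl i rest (s + 1) x

-- 'for i in range(len(mass))' of the single-excitation block
def loopAi (is : List Int) (s x : Int) : Option (List Int) × Int :=
  match is with
  | [] => (none, s)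
  | i :: rest =>
    match loopAl i (PySem.List.pyRange 1 statesA 1) s x with
    | (some r, s') => (some r, s')
    | (none, s') => loopAi rest s' x

-- innermost 'for m in range(1, states)' of the double-excitation block
def loopAm (i j l : Int) (ms : List Int) (s x : Int) : Option (List Int) × Int :=
  match ms with
  | [] => (none, s)
  | m :: rest =>
    if s = x then
      (some ((((List.replicate massA.length (0 : Int)).set i.toNat l).set j.toNat m).reverse), s)
    else loopAm i j l rest (s + 1) x

-- 'for l in range(1, states)' of the double-excitation block
def loopAn (i j : Int) (ls : List Int) (s x : Int) : Option (List Int) × Int :=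
  match ls with
  | [] => (none, s)
  | l :: rest =>
    match loopAm i j l (PySem.List.pyRange 1 statesA 1) s x with
    | (some r, s') => (some r, s')
    | (none, s') => loopAn i j rest s' x

-- 'for i in range(j+1, len(mass))'
def loopAj (j : Int) (is : List Int) (s x : Int) : Option (List Int) × Int :=
  match is with
  | [] => (none, s)
  | i :: rest =>
    match loopAn i j (PySem.List.pyRange 1 statesA 1) s x with
    | (some r, s') => (some r, s')
    | (none, s') => loopAj j rest s' x

-- 'for j in range(len(mass))'
def loopAjj (js : List Int) (s x : Int) : Option (List Int) × Int :=
  match js with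
  | [] => (none, s)
  | j :: rest =>
    match loopAj j (PySem.List.pyRange (j + 1) (massA.length : Int) 1) s x with
    | (some r, s') => (some r, s')
    | (none, s') => loopAjj rest s' x

def change_of_base (x : Int) : Option (List Int) :=
  if x = 0 then some (List.replicate massA.length 0)
  else
    match loopAi (PySem.List.pyRange 0 (massA.length : Int) 1) 1 x with
    | (some r, _) => some r
    | (none, s) =>
      match loopAjj (PySem.List.pyRange 0 (massA.length : Int) 1) s x with
      | (some r, _) => some r
      | (none, s') => if s' ≤ x then some (List.replicate massA.length 0) else none

-- ===== PORT B =====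
def massB : List Int := [1, 1, 1]
def statesB : Int := 3

-- the enumeration table built once by B's nested loops
def tableB : List (List Int) :=
  let t0 : List (List Int) := [List.replicate massB.length (0 : Int)]
  let t1 := (PySem.List.pyRange 0 (massB.length : Int) 1).foldl (fun t i =>
      (PySem.List.pyRange 1 statesB 1).foldl (fun t l =>
        t ++ [((List.replicate massB.length (0 : Int)).set i.toNat l).reverse]) t) t0
  (PySem.List.pyRange 0 (massB.length : Int) 1).foldl (fun t j =>
    (PySem.List.pyRange (j + 1) (massB.length : Int) 1).foldl (fun t i =>
      (PySem.List.pyRange 1 statesB 1).foldl (fun t l =>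
        (PySem.List.pyRange 1 statesB 1).foldl (fun t m =>
          t ++ [(((List.replicate massB.length (0 : Int)).set i.toNat l).set j.toNat m).reverse]) t) t) t) t1

def change_of_base_alt (x : Int) : Option (List Int) :=
  if 0 ≤ x ∧ x < (tableB.length : Int) then PySem.List.pyGet? tableB x
  else if (tableB.length : Int) ≤ x then some (List.replicate massB.length 0)
  else none

-- ===== PRECONDITION & SPEC =====
def Spec_change_of_base (x : Int) (out : Option (List Int)) : Prop := out = change_of_base_alt x
instance (x : Int) (out : Option (List Int)) : Decidable (Spec_change_of_base x out) := by unfold Spec_change_of_base; infer_instance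

-- ===== CLAIM (what is proved, stated in full; the proofs are below) =====
def Claim_equal_change_of_base : Prop := ∀ (x : Int), Dom_change_of_base x → Spec_change_of_base x (change_of_base x)

-- ===== LEMMAS AND PROOFS =====
lemma loopAl_skip (i : Int) (ls : List Int) (s x : Int)
    (h : x < s ∨ s + (ls.length : Int) ≤ x) :
    loopAl i ls s x = (none, s + (ls.length : Int)) := by
  induction ls generalizing s with
  | nil => simp [loopAl]
  | cons l rest ih =>
    have hne : ¬ s = x := by simp at h; omega
    rw [loopAl, if_neg hne, ih (s + 1) (by simp at h; omega)]
    simp; omega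

lemma loopAi_skip (is : List Int) (s x : Int)
    (h : x < s ∨ s + 2 * (is.length : Int) ≤ x) :
    loopAi is s x = (none, s + 2 * (is.length : Int)) := by
  induction is generalizing s with
  | nil => simp [loopAi]
  | cons i rest ih =>
    rw [loopAi, show PySem.List.pyRange 1 statesA 1 = [1, 2] from by decide,
      loopAl_skip i [1, 2] s x (by simp at h ⊢; omega),
      show s + (([1, 2] : List Int).length : Int) = s + 2 from by norm_num]
    show loopAi rest (s + 2) x = _
    rw [ih (s + 2) (by simp at h; omega)]
    simp; omega

lemma loopAm_skip (i j l : Int) (ms : List Int) (s x : Int)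
    (h : x < s ∨ s + (ms.length : Int) ≤ x) :
    loopAm i j l ms s x = (none, s + (ms.length : Int)) := by
  induction ms generalizing s with
  | nil => simp [loopAm]
  | cons m rest ih =>
    have hne : ¬ s = x := by simp at h; omega
    rw [loopAm, if_neg hne, ih (s + 1) (by simp at h; omega)]
    simp; omega

lemma loopAn_skip (i j : Int) (ls : List Int) (s x : Int)
    (h : x < s ∨ s + 2 * (ls.length : Int) ≤ x) :
    loopAn i j ls s x = (none, s + 2 * (ls.length : Int)) := by
  induction ls generalizing s with
  | nil => simp [loopAn]
  | cons l rest ih =>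
    rw [loopAn, show PySem.List.pyRange 1 statesA 1 = [1, 2] from by decide,
      loopAm_skip i j l [1, 2] s x (by simp at h ⊢; omega),
      show s + (([1, 2] : List Int).length : Int) = s + 2 from by norm_num]
    show loopAn i j rest (s + 2) x = _
    rw [ih (s + 2) (by simp at h; omega)]
    simp; omega

lemma loopAj_skip (j : Int) (is : List Int) (s x : Int)
    (h : x < s ∨ s + 4 * (is.length : Int) ≤ x) :
    loopAj j is s x = (none, s + 4 * (is.length : Int)) := by
  induction is generalizing s with
  | nil => simp [loopAj]
  | cons i rest ih =>
    rw [loopAj, show PySem.List.pyRange 1 statesA 1 = [1, 2] from by decide,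
      loopAn_skip i j [1, 2] s x (by simp at h ⊢; omega),
      show s + 2 * (([1, 2] : List Int).length : Int) = s + 4 from by norm_num]
    show loopAj j rest (s + 4) x = _
    rw [ih (s + 4) (by simp at h; omega)]
    simp; omega

-- the common closed-form value table both ports reduce to
def chainD (x : Int) : Option (List Int) :=
  if x = 0 then some [0,0,0] else if x = 1 then some [0,0,1]
  else if x = 2 then some [0,0,2] else if x = 3 then some [0,1,0]
  else if x = 4 then some [0,2,0] else if x = 5 then some [1,0,0]
  else if x = 6 then some [2,0,0] else if x = 7 then some [0,1,1]
  else if x = 8 then some [0,1,2] else if x = 9 then some [0,2,1]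
  else if x = 10 then some [0,2,2] else if x = 11 then some [1,0,1]
  else if x = 12 then some [1,0,2] else if x = 13 then some [2,0,1]
  else if x = 14 then some [2,0,2] else if x = 15 then some [1,1,0]
  else if x = 16 then some [1,2,0] else if x = 17 then some [2,1,0]
  else if x = 18 then some [2,2,0] else if 19 ≤ x then some [0,0,0] else none

lemma chain_tail (x : Int) (h : x < 0 ∨ 19 ≤ x) :
    chainD x = (if (19 : Int) ≤ x then some [0, 0, 0] else none) := by
  rw [chainD,
    if_neg (show ¬ x = 0 by omega),
    if_neg (show ¬ x = 1 by omega),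
    if_neg (show ¬ x = 2 by omega),
    if_neg (show ¬ x = 3 by omega),
    if_neg (show ¬ x = 4 by omega),
    if_neg (show ¬ x = 5 by omega),
    if_neg (show ¬ x = 6 by omega),
    if_neg (show ¬ x = 7 by omega),
    if_neg (show ¬ x = 8 by omega),
    if_neg (show ¬ x = 9 by omega),
    if_neg (show ¬ x = 10 by omega),
    if_neg (show ¬ x = 11 by omega),
    if_neg (show ¬ x = 12 by omega),
    if_neg (show ¬ x = 13 by omega),
    if_neg (show ¬ x = 14 by omega),
    if_neg (show ¬ x = 15 by omega),
    if_neg (show ¬ x = 16 by omega),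
    if_neg (show ¬ x = 17 by omega),
    if_neg (show ¬ x = 18 by omega)]

set_option maxHeartbeats 1000000 in
lemma A_chain (x : Int) : change_of_base x = chainD x := by
  rcases eq_or_ne x 0 with rfl | hx0
  · decide
  by_cases hmid : 1 ≤ x ∧ x ≤ 18
  · obtain ⟨h1, h2⟩ := hmid
    interval_cases x <;> decide
  · -- x < 0 or 19 ≤ x: every counter test misses, both loops run to completion with s = 19
    have hx : x < 1 ∨ 19 ≤ x := by omega
    have e1 : loopAi [0, 1, 2] 1 x = (none, 7) := by
      rw [loopAi_skip [0, 1, 2] 1 x (by simp; omega)]; norm_num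
    have e2 : loopAj 0 [1, 2] 7 x = (none, 15) := by
      rw [loopAj_skip 0 [1, 2] 7 x (by simp; omega)]; norm_num
    have e3 : loopAj 1 [2] 15 x = (none, 19) := by
      rw [loopAj_skip 1 [2] 15 x (by simp; omega)]; norm_num
    have e4 : loopAj 2 [] 19 x = (none, 19) := by
      rw [loopAj_skip 2 [] 19 x (by simp; omega)]; norm_num
    have e7 : loopAjj [2] 19 x = (none, 19) := by
      rw [loopAjj, show PySem.List.pyRange (2 + 1) (massA.length : Int) 1 = [] from by decide, e4]
      rfl
    have e6 : loopAjj [1, 2] 15 x = (none, 19) := by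
      rw [loopAjj, show PySem.List.pyRange (1 + 1) (massA.length : Int) 1 = [2] from by decide, e3]
      exact e7
    have e5 : loopAjj [0, 1, 2] 7 x = (none, 19) := by
      rw [loopAjj, show PySem.List.pyRange (0 + 1) (massA.length : Int) 1 = [1, 2] from by decide, e2]
      exact e6
    have eA : change_of_base x = (if (19 : Int) ≤ x then some (List.replicate massA.length 0) else none) := by
      rw [change_of_base, if_neg hx0,
        show PySem.List.pyRange 0 (massA.length : Int) 1 = [0, 1, 2] from by decide, e1]
      show (match loopAjj [0, 1, 2] 7 x with
        | (some r, _) => some r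
        | (none, s') => if s' ≤ x then some (List.replicate massA.length 0) else none) = _
      rw [e5]
    rw [eA, show List.replicate massA.length (0 : Int) = [0, 0, 0] from by decide,
      chain_tail x (by omega)]

set_option maxHeartbeats 1000000 in
lemma B_chain (x : Int) : change_of_base_alt x = chainD x := by
  rcases eq_or_ne x 0 with rfl | hx0
  · decide
  by_cases hmid : 1 ≤ x ∧ x ≤ 18
  · obtain ⟨h1, h2⟩ := hmid
    interval_cases x <;> decide
  · have hlen : (tableB.length : Int) = 19 := by norm_num [show tableB.length = 19 from by decide]
    have hnot : ¬ (0 ≤ x ∧ x < (tableB.length : Int)) := by rw [hlen]; omega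
    rw [change_of_base_alt, if_neg hnot, hlen,
      show List.replicate massB.length (0 : Int) = [0, 0, 0] from by decide,
      chain_tail x (by omega)]

-- ===== VERDICT (by name: the statement is the Claim_ definition above) =====
theorem change_of_base_spec : Claim_equal_change_of_base := by
  intro x _
  unfold Spec_change_of_base
  rw [A_chain, B_chain]
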